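-- pv_equiv track=rewrite | github.com/jjshay/dataradar-listings | consolidate_all.py | detect_artist
-- ===== SOURCE A (Python) =====
-- def detect_artist(text):
--     t = (text or '').lower()
--     if 'shepard fairey' in t or 'obey giant' in t or ('obey' in t and ('print' in t or 'signed' in t or 'screen' in t)):
--         return 'Shepard Fairey'
--     elif 'kaws' in t: return 'KAWS'
--     elif 'death nyc' in t: return 'Death NYC'
--     elif 'banksy' in t: return 'Banksy'
--     elif 'brainwash' in t or 'mbw' in t: return 'Mr. Brainwash'
--     elif 'bearbrick' in t or 'be@rbrick' in t: return 'Bearbrick'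
--     elif any(w in t for w in ['apollo', 'nasa', 'astronaut', 'aldrin', 'armstrong', 'glenn']): return 'Space/NASA'
--     return None
-- ===== SOURCE B (Python) =====
-- # Inverted keyword index: every keyword maps to a (priority, label) pair.
-- # B collects ALL matching hits exhaustively and aggregates with min() by
-- # priority, instead of an ordered short-circuit cascade of rule tests.
-- KEYWORDS = {
--     'shepard fairey': (0, 'Shepard Fairey'),
--     'obey giant': (0, 'Shepard Fairey'),
--     'kaws': (1, 'KAWS'),
--     'death nyc': (2, 'Death NYC'),
--     'banksy': (3, 'Banksy'),
--     'brainwash': (4, 'Mr. Brainwash'),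
--     'mbw': (4, 'Mr. Brainwash'),
--     'bearbrick': (5, 'Bearbrick'),
--     'be@rbrick': (5, 'Bearbrick'),
--     'apollo': (6, 'Space/NASA'),
--     'nasa': (6, 'Space/NASA'),
--     'astronaut': (6, 'Space/NASA'),
--     'aldrin': (6, 'Space/NASA'),
--     'armstrong': (6, 'Space/NASA'),
--     'glenn': (6, 'Space/NASA'),
-- }
--
-- def detect_artist(text):
--     t = (text or '').lower()
--     # the one conjunctive rule: 'obey' together with a print-related word
--     hits = [(0, 'Shepard Fairey')] if 'obey' in t and ('print' in t or 'signed' in t or 'screen' in t) else []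
--     hits += [pl for kw, pl in KEYWORDS.items() if kw in t]
--     if not hits:
--         return None
--     return min(hits, key=lambda h: h[0])[1]
-- ===== Notes on version B (the rewrite author's own statement) =====
-- stated objective: alternative
-- what changed: Replaces the ordered short-circuit if/elif cascade by an inverted keyword->(priority,label) index: B collects ALL matching keywords exhaustively (plus the one conjunctive obey rule) and returns the label of the minimum-priority hit via min(), instead of testing rules in order and returning at the first match.
import Mathlib
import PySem

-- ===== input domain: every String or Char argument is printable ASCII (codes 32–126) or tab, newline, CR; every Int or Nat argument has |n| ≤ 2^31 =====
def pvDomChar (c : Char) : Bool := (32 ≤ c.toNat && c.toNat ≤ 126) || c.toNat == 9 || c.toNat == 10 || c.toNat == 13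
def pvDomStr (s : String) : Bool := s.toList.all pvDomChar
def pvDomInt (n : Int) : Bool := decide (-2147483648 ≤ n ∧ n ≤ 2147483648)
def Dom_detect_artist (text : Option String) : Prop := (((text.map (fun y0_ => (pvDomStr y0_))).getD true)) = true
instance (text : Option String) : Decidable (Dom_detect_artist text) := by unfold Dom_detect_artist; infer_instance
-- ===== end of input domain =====

-- B replaces A's short-circuit if/elif cascade with an inverted keyword->(priority,label) index: it collects ALL keyword hits exhaustively and returns the minimum-priority label (alternative algorithm, same cost).


-- ===== PORT A =====
def detect_artist (text : Option String) : Option String :=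
  let t := PySem.Str.lower (text.getD "")
  if PySem.Str.isIn "shepard fairey" t || PySem.Str.isIn "obey giant" t ||
      (PySem.Str.isIn "obey" t &&
        (PySem.Str.isIn "print" t || PySem.Str.isIn "signed" t || PySem.Str.isIn "screen" t)) then
    some "Shepard Fairey"
  else if PySem.Str.isIn "kaws" t then some "KAWS"
  else if PySem.Str.isIn "death nyc" t then some "Death NYC"
  else if PySem.Str.isIn "banksy" t then some "Banksy"
  else if PySem.Str.isIn "brainwash" t || PySem.Str.isIn "mbw" t then some "Mr. Brainwash"
  else if PySem.Str.isIn "bearbrick" t || PySem.Str.isIn "be@rbrick" t then some "Bearbrick"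
  else if ["apollo", "nasa", "astronaut", "aldrin", "armstrong", "glenn"].any
      (fun w => PySem.Str.isIn w t) then some "Space/NASA"
  else none

-- ===== PORT B =====
-- the KEYWORDS inverted index of Source B: keyword -> (priority, label), in insertion order
def pvKeywords : List (String × (Int × String)) :=
  [ ("shepard fairey", (0, "Shepard Fairey")),
    ("obey giant", (0, "Shepard Fairey")),
    ("kaws", (1, "KAWS")),
    ("death nyc", (2, "Death NYC")),
    ("banksy", (3, "Banksy")),
    ("brainwash", (4, "Mr. Brainwash")),
    ("mbw", (4, "Mr. Brainwash")),
    ("bearbrick", (5, "Bearbrick")),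
    ("be@rbrick", (5, "Bearbrick")),
    ("apollo", (6, "Space/NASA")),
    ("nasa", (6, "Space/NASA")),
    ("astronaut", (6, "Space/NASA")),
    ("aldrin", (6, "Space/NASA")),
    ("armstrong", (6, "Space/NASA")),
    ("glenn", (6, "Space/NASA")) ]

-- Source B: collect all hits (conjunctive obey rule first, then the comprehension over
-- KEYWORDS, rendered as the structural foldr), then min() by priority, None if empty
def detect_artist_alt (text : Option String) : Option String :=
  let t := PySem.Str.lower (text.getD "")
  let hits :=
    (if PySem.Str.isIn "obey" t &&
        (PySem.Str.isIn "print" t || PySem.Str.isIn "signed" t || PySem.Str.isIn "screen" t) then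
      [((0 : Int), "Shepard Fairey")] else []) ++
    pvKeywords.foldr (fun kv acc => if PySem.Str.isIn kv.1 t then kv.2 :: acc else acc) []
  (PySem.List.min? hits (fun h => h.1)).map (fun m => m.2)

-- ===== PRECONDITION & SPEC =====
def Spec_detect_artist (text : Option String) (out : Option String) : Prop := out = detect_artist_alt text
instance (text : Option String) (out : Option String) : Decidable (Spec_detect_artist text out) := by unfold Spec_detect_artist; infer_instance

-- ===== CLAIM (what is proved, stated in full; the proofs are below) =====
def Claim_equal_detect_artist : Prop := ∀ (text : Option String), Dom_detect_artist text → Spec_detect_artist text (detect_artist text)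

-- ===== LEMMAS AND PROOFS =====
-- proof-side view of B's hit list: one (flag, (priority, label)) candidate per rule, in order
def pvTable (t : String) : List (Bool × (Int × String)) :=
  (PySem.Str.isIn "obey" t &&
      (PySem.Str.isIn "print" t || PySem.Str.isIn "signed" t || PySem.Str.isIn "screen" t),
    ((0 : Int), "Shepard Fairey")) ::
  pvKeywords.map (fun kv => (PySem.Str.isIn kv.1 t, kv.2))

def pvCollect (table : List (Bool × (Int × String))) : List (Int × String) :=
  table.foldr (fun c acc => if c.1 = true then c.2 :: acc else acc) []

theorem pvCollectCons (x : Bool × (Int × String)) (xs : List (Bool × (Int × String))) :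
    pvCollect (x :: xs) = if x.1 = true then x.2 :: pvCollect xs else pvCollect xs := rfl

-- Python min (first minimal) of a list whose head already has a minimal key is the head
theorem pvMinHead (m : Int × String) (rest : List (Int × String))
    (h : ∀ y ∈ rest, m.1 ≤ y.1) :
    PySem.List.min? (m :: rest) (fun h => h.1) = some m := by
  induction rest with
  | nil => rfl
  | cons y ys ih =>
    have hy := h y (by simp)
    have ih' := ih (fun z hz => h z (by simp [hz]))
    rw [show PySem.List.min? (m :: y :: ys) (fun h => h.1)
          = PySem.List.min? (m :: ys) (fun h => h.1) from ?_]
    · exact ih'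
    · simp only [PySem.List.min?, List.foldl_cons]
      congr 1
      show (if y.1 < m.1 then some y else some m) = some m
      rw [if_neg (by omega)]

-- every collected hit comes from a table entry
theorem pvMemCollect (xs : List (Bool × (Int × String))) (y : Int × String)
    (hy : y ∈ pvCollect xs) : ∃ c ∈ xs, y = c.2 := by
  induction xs with
  | nil => cases hy
  | cons x xs ih =>
    unfold pvCollect at hy
    simp only [List.foldr_cons] at hy
    by_cases hc : x.1 = true
    · rw [if_pos hc] at hy
      rcases List.mem_cons.mp hy with h | h
      · exact ⟨x, by simp, h⟩
      · rcases ih h with ⟨c, hm, he⟩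
        exact ⟨c, by simp [hm], he⟩
    · rw [if_neg hc] at hy
      rcases ih hy with ⟨c, hm, he⟩
      exact ⟨c, by simp [hm], he⟩

-- on a priority-sorted candidate table, min-priority selection over all hits = first match
theorem pvMaster (table : List (Bool × (Int × String)))
    (hp : table.Pairwise (fun a b => a.2.1 ≤ b.2.1)) :
    (PySem.List.min? (pvCollect table) (fun h => h.1)).map (fun m => m.2)
      = (table.find? (fun c => c.1)).map (fun c => c.2.2) := by
  induction table with
  | nil => rfl
  | cons x xs ih =>
    rcases List.pairwise_cons.mp hp with ⟨hx, hxs⟩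
    by_cases hc : x.1 = true
    · rw [pvCollectCons, if_pos hc, List.find?_cons_of_pos hc,
        pvMinHead x.2 _ (fun y hy => by
          rcases pvMemCollect xs y hy with ⟨c, hm, he⟩
          rw [he]; exact hx c hm)]
      rfl
    · rw [pvCollectCons, if_neg hc, List.find?_cons_of_neg (by simpa using hc)]
      exact ih hxs

-- B's hit list is exactly the collected hits of the candidate table
theorem pvHitsEq (t : String) :
    ((if PySem.Str.isIn "obey" t &&
          (PySem.Str.isIn "print" t || PySem.Str.isIn "signed" t || PySem.Str.isIn "screen" t) then
        [((0 : Int), "Shepard Fairey")] else []) ++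
      pvKeywords.foldr (fun kv acc => if PySem.Str.isIn kv.1 t then kv.2 :: acc else acc) [])
    = pvCollect (pvTable t) := by
  unfold pvCollect pvTable
  simp only [List.foldr_cons, List.foldr_map]
  cases hcomp : (PySem.Str.isIn "obey" t &&
      (PySem.Str.isIn "print" t || PySem.Str.isIn "signed" t || PySem.Str.isIn "screen" t))
  · simp only [Bool.false_eq_true, if_false, List.nil_append]
  · simp only [if_true, List.singleton_append]

-- the candidate priorities are listed in nondecreasing order
theorem pvTablePairwise (t : String) :
    (pvTable t).Pairwise (fun a b => a.2.1 ≤ b.2.1) := by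
  unfold pvTable pvKeywords
  simp only [List.map_cons, List.map_nil]
  norm_num [List.pairwise_cons]

-- find? over the head of a candidate table, as an if-cascade
theorem pvMapFind (f : Bool × (Int × String) → String)
    (x : Bool × (Int × String)) (xs : List (Bool × (Int × String))) :
    (List.find? (fun c => c.1) (x :: xs)).map f
      = if x.1 then some (f x) else (List.find? (fun c => c.1) xs).map f := by
  by_cases h : x.1 = true <;> simp [h]

-- splitting a disjunctive guard into two cascaded guards
theorem pvIfOrSplit {α : Type} (x y : Bool) (A B : α) :
    (if x || y then A else B) = if x then A else if y then A else B := by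
  cases x <;> cases y <;> simp

-- ===== VERDICT (by name: the statement is the Claim_ definition above) =====
set_option maxHeartbeats 1000000 in
theorem detect_artist_spec : Claim_equal_detect_artist := by
  intro text _
  unfold Spec_detect_artist
  simp only [detect_artist, detect_artist_alt]
  set t := PySem.Str.lower (text.getD "") with ht
  rw [pvHitsEq t, pvMaster _ (pvTablePairwise t)]
  unfold pvTable pvKeywords
  simp only [List.map_cons, List.map_nil, pvMapFind, List.find?_nil, Option.map_none,
    List.any_cons, List.any_nil, Bool.or_false, pvIfOrSplit]
  generalize (PySem.Str.isIn "obey" t &&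
      (PySem.Str.isIn "print" t || PySem.Str.isIn "signed" t || PySem.Str.isIn "screen" t)) = w
  generalize PySem.Str.isIn "shepard fairey" t = a
  generalize PySem.Str.isIn "obey giant" t = b
  cases a <;> cases b <;> cases w <;> rfl
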